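-- pv_equiv track=rewrite | github.com/gray-ji/coding-challenges | 프로그래머스/0/120876. 겹치는 선분의 길이/겹치는 선분의 길이.py | solution
-- ===== SOURCE A (Python) =====
-- def solution(lines):
--     cnts = [0] * 201
--     answer = 0
--
--     for start, end in lines:
--         for i in range(start, end):
--             cnts[i+100] += 1
--
--     for i in cnts:
--         if i > 1:
--             answer += 1
--
--     return answer
-- ===== SOURCE B (Python) =====
-- def solution(lines):
--     diff = [0] * 202
--     for start, end in lines:
--         if start < end:
--             diff[start + 100] += 1
--             diff[end + 100] -= 1
--     answer = 0
--     cover = 0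
--     for d in diff[:201]:
--         cover += d
--         if cover > 1:
--             answer += 1
--     return answer
-- ===== Notes on version B (the rewrite author's own statement) =====
-- stated objective: faster
-- what changed: Replaces A's per-unit counting loop (one increment per covered unit of each segment) with a difference array: +1/-1 at each non-empty segment's endpoints, then one prefix-sum sweep counting cells with coverage > 1.
-- outside the precondition, e.g. on solution([[-101, 2], [-101, 2]]): A returns 103, B returns 0
import Mathlib
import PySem

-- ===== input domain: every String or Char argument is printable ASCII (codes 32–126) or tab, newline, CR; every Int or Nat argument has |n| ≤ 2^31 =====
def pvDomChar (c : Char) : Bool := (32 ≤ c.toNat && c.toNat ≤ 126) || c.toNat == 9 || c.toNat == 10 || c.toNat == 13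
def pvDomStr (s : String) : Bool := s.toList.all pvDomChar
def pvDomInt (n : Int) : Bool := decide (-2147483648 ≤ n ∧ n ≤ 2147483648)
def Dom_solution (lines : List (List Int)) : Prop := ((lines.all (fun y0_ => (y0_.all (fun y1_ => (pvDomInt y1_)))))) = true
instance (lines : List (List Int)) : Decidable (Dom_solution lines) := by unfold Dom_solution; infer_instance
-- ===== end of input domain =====

-- B replaces A's per-unit counting loop (one increment per covered unit of each
-- segment) by an endpoint difference array and a single prefix-sum sweep.

-- ===== PORT A =====
-- for i in range(start, end): cnts[i+100] += 1   (index nonnegative under Pre_)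
def pvAddSeg (cnts : List Int) (s e : Int) : List Int :=
  (PySem.List.pyRange s e).foldl (fun c i => c.modify (i + 100).toNat (· + 1)) cnts

def solution (lines : List (List Int)) : Int :=
  let cnts : List Int := List.replicate 201 0
  let cnts := lines.foldl (fun c l =>
    match l with
    | [s, e] => pvAddSeg c s e
    | _ => c) cnts
  cnts.foldl (fun a i => if i > 1 then a + 1 else a) 0

-- ===== PORT B =====
def solution_alt (lines : List (List Int)) : Int :=
  let diff : List Int := List.replicate 202 0
  let diff := lines.foldl (fun d l =>
    let s := l.getD 0 0   -- tuple unpacking 'start, end = l' (Pre_: l is a pair)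
    let e := l.getD 1 0
    if s < e then
      ((d.modify (s + 100).toNat (· + 1)).modify (e + 100).toNat (· + (-1)))
    else d) diff
  -- for d in diff[:201]: cover += d; if cover > 1: answer += 1
  ((diff.take 201).foldl
    (fun (p : Int × Int) x =>
      (if p.2 + x > 1 then p.1 + 1 else p.1, p.2 + x)) (0, 0)).1

-- ===== PRECONDITION & SPEC =====
-- Pre_ admits exactly the shape A indexes meaningfully: each line is a pair
-- (otherwise unpacking raises ValueError) and a non-empty segment lies in the
-- problem's coordinate range (A raises IndexError far outside it, and for
-- starts in [-301,-101] A returns a value only through Python's accidental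
-- negative-index wraparound, which is an artefact of A's implementation).
def Pre_solution (lines : List (List Int)) : Prop :=
  ∀ l ∈ lines, l.length = 2 ∧
    (l.getD 1 0 ≤ l.getD 0 0 ∨ (-100 ≤ l.getD 0 0 ∧ l.getD 1 0 ≤ 101))
instance (lines : List (List Int)) : Decidable (Pre_solution lines) := by
  unfold Pre_solution; infer_instance

def pvWitness_solution : List (List Int) := [[-3, 5], [0, 10], [2, 4]]

def Spec_solution (lines : List (List Int)) (out : Int) : Prop := out = solution_alt lines
instance (lines : List (List Int)) (out : Int) : Decidable (Spec_solution lines out) := by unfold Spec_solution; infer_instance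

-- ===== CLAIM (what is proved, stated in full; the proofs are below) =====
def Claim_equal_solution : Prop := ∀ (lines : List (List Int)), Dom_solution lines → Pre_solution lines → Spec_solution lines (solution lines)

-- ===== LEMMAS AND PROOFS =====

-- coverage of cell j by a single line (A's view)
def pvInd (l : List Int) (j : Nat) : Int :=
  match l with
  | [s, e] => if s + 100 ≤ (j : Int) ∧ (j : Int) < e + 100 then 1 else 0
  | _ => 0

-- endpoint delta of a single line at cell j (B's view)
def pvDelta (l : List Int) (j : Nat) : Int :=
  match l with
  | [s, e] =>
      if s < e then
        (if (j : Int) = s + 100 then 1 else 0) - (if (j : Int) = e + 100 then 1 else 0)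
      else 0
  | _ => 0

def pvC (lines : List (List Int)) (j : Nat) : Int := (lines.map (fun l => pvInd l j)).sum
def pvD (lines : List (List Int)) (j : Nat) : Int := (lines.map (fun l => pvDelta l j)).sum

lemma pvGetD_modify (c : List Int) (i j : Nat) (f : Int → Int) (hj : j < c.length) :
    (c.modify i f).getD j 0 = if i = j then f (c.getD j 0) else c.getD j 0 := by
  simp only [List.getD_eq_getElem?_getD, List.getElem?_modify, List.getElem?_eq_getElem hj]
  split <;> rfl

lemma pvAddSeg_length (s e : Int) (c : List Int) : (pvAddSeg c s e).length = c.length := by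
  unfold pvAddSeg
  generalize PySem.List.pyRange s e = r
  induction r generalizing c with
  | nil => rfl
  | cons x xs ih => simp only [List.foldl_cons]; rw [ih, List.length_modify]

lemma pvFoldA_length (lines : List (List Int)) (c : List Int) :
    (lines.foldl (fun c l => match l with | [s, e] => pvAddSeg c s e | _ => c) c).length
      = c.length := by
  induction lines generalizing c with
  | nil => rfl
  | cons l ls ih =>
      match l with
      | [] => exact ih c
      | [_] => exact ih c
      | [s, e] => rw [List.foldl_cons, ih, pvAddSeg_length]
      | _ :: _ :: _ :: _ => exact ih c

lemma pvFoldB_length (lines : List (List Int)) (d : List Int) :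
    (lines.foldl (fun d l =>
      let s := l.getD 0 0
      let e := l.getD 1 0
      if s < e then ((d.modify (s + 100).toNat (· + 1)).modify (e + 100).toNat (· + (-1))) else d) d).length = d.length := by
  induction lines generalizing d with
  | nil => rfl
  | cons l ls ih =>
      rw [List.foldl_cons]
      dsimp only
      split
      · rw [ih, List.length_modify, List.length_modify]
      · exact ih d

lemma pvGet_foldMod (r : List Int) (c : List Int) (j : Nat) (hj : j < c.length)
    (hr : ∀ i ∈ r, 0 ≤ i + 100) :
    (r.foldl (fun c i => c.modify (i + 100).toNat (· + 1)) c).getD j 0 =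
      c.getD j 0 + (r.map (fun i => if (j : Int) = i + 100 then (1 : Int) else 0)).sum := by
  induction r generalizing c with
  | nil => simp
  | cons x xs ih =>
      simp only [List.foldl_cons, List.map_cons, List.sum_cons]
      rw [ih _ (by rw [List.length_modify]; exact hj) (fun i hi => hr i (by simp [hi]))]
      rw [pvGetD_modify _ _ _ _ hj]
      have hx : 0 ≤ x + 100 := hr x (by simp)
      by_cases h : (j : Int) = x + 100
      · have ht : (x + 100).toNat = j := by omega
        rw [if_pos ht, if_pos h]
        ring
      · have ht : (x + 100).toNat ≠ j := by omega
        rw [if_neg ht, if_neg h]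
        ring

lemma pvSum_range_shift_ind (n : Nat) (a t : Int) :
    ((List.range n).map (fun k : Nat => if t = a + (k : Int) + 100 then (1 : Int) else 0)).sum
      = if a + 100 ≤ t ∧ t < a + (n : Int) + 100 then 1 else 0 := by
  induction n with
  | zero =>
      simp only [List.range_zero, List.map_nil, List.sum_nil]
      rw [if_neg (by omega)]
  | succ m ih =>
      rw [List.range_succ, List.map_append, List.sum_append, ih]
      simp only [List.map_cons, List.map_nil, List.sum_cons, List.sum_nil, add_zero]
      by_cases h : t = a + (m : Int) + 100
      · rw [if_pos h, if_neg (by omega), if_pos (by push_cast; omega)]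
        ring
      · rw [if_neg h]
        by_cases h2 : a + 100 ≤ t ∧ t < a + (m : Int) + 100
        · rw [if_pos h2, if_pos (by push_cast; omega)]
          ring
        · rw [if_neg h2, if_neg (by push_cast; omega)]
          ring

lemma pvSum_pyRange_ind (s e t : Int) :
    ((PySem.List.pyRange s e).map (fun i => if t = i + 100 then (1 : Int) else 0)).sum
      = if s + 100 ≤ t ∧ t < e + 100 then 1 else 0 := by
  rw [PySem.List.pyRange_one, List.map_map]
  have h := pvSum_range_shift_ind (e - s).toNat s t
  rw [show ((fun i => if t = i + 100 then (1 : Int) else 0) ∘ fun k : Nat => s + (k : Int))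
      = (fun k : Nat => if t = s + (k : Int) + 100 then (1 : Int) else 0) from rfl]
  rw [h]
  have hiff : (s + 100 ≤ t ∧ t < s + (((e - s).toNat : Nat) : Int) + 100)
      ↔ (s + 100 ≤ t ∧ t < e + 100) := by omega
  rw [if_congr hiff rfl rfl]

lemma pvSum_range_ind (t : Int) (n : Nat) :
    ((List.range n).map (fun i : Nat => if (i : Int) = t then (1 : Int) else 0)).sum
      = if 0 ≤ t ∧ t < (n : Int) then 1 else 0 := by
  induction n with
  | zero =>
      simp only [List.range_zero, List.map_nil, List.sum_nil]
      split
      · omega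
      · rfl
  | succ m ih =>
      rw [List.range_succ, List.map_append, List.sum_append, ih]
      simp only [List.map_cons, List.map_nil, List.sum_cons, List.sum_nil, add_zero]
      by_cases h : (m : Int) = t
      · rw [if_pos h]
        rw [if_neg (by omega), if_pos (by omega)]
        ring
      · rw [if_neg h]
        by_cases h2 : 0 ≤ t ∧ t < (m : Int)
        · rw [if_pos h2, if_pos (by omega)]
          ring
        · rw [if_neg h2, if_neg (by omega)]
          ring

lemma pvFoldA_get (lines : List (List Int)) (hpre : Pre_solution lines)
    (c : List Int) (j : Nat) (hj : j < c.length) :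
    (lines.foldl (fun c l => match l with | [s, e] => pvAddSeg c s e | _ => c) c).getD j 0
      = c.getD j 0 + pvC lines j := by
  induction lines generalizing c with
  | nil => simp [pvC]
  | cons l ls ih =>
      have hl := hpre l (by simp)
      have hpre' : Pre_solution ls := fun x hx => hpre x (by simp [hx])
      have hC : pvC (l :: ls) j = pvInd l j + pvC ls j := by simp [pvC]
      match l, hl with
      | [a, b], hl =>
        rw [List.foldl_cons]
        dsimp only
        rw [ih hpre' _ (by rw [pvAddSeg_length]; exact hj), hC]
        have hget : (pvAddSeg c a b).getD j 0 = c.getD j 0 + pvInd [a, b] j := by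
          unfold pvAddSeg
          by_cases hab : a < b
          · have hbound : b ≤ a ∨ (-100 ≤ a ∧ b ≤ 101) := by
              simpa [List.getD] using hl.2
            have ha : -100 ≤ a := by rcases hbound with h | h; omega; exact h.1
            rw [pvGet_foldMod _ _ _ hj (fun i hi => by
              have := PySem.List.mem_pyRange_one.mp hi; omega)]
            rw [pvSum_pyRange_ind]
            rfl
          · have hnil : PySem.List.pyRange a b = [] := by
              rw [PySem.List.pyRange_one]
              have : (b - a).toNat = 0 := by omega
              rw [this]
              rfl
            rw [hnil]
            simp only [List.foldl_nil, pvInd]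
            rw [if_neg (by omega)]
            ring
        rw [hget]
        ring
      | [], hl => simp at hl
      | [_], hl => simp at hl
      | _ :: _ :: _ :: _, hl => simp at hl

lemma pvFoldB_get (lines : List (List Int)) (hpre : Pre_solution lines)
    (d : List Int) (j : Nat) (hj : j < d.length) (hd : (201 : Int) ≤ (d.length : Int)) :
    (lines.foldl (fun d l =>
      let s := l.getD 0 0
      let e := l.getD 1 0
      if s < e then ((d.modify (s + 100).toNat (· + 1)).modify (e + 100).toNat (· + (-1))) else d) d).getD j 0 = d.getD j 0 + pvD lines j := by
  induction lines generalizing d with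
  | nil => simp [pvD]
  | cons l ls ih =>
      have hl := hpre l (by simp)
      have hpre' : Pre_solution ls := fun x hx => hpre x (by simp [hx])
      have hD : pvD (l :: ls) j = pvDelta l j + pvD ls j := by simp [pvD]
      match l, hl with
      | [a, b], hl =>
        rw [List.foldl_cons]
        simp only [List.getD_cons_zero, List.getD_cons_succ]
        by_cases hab : a < b
        · have hbound : b ≤ a ∨ (-100 ≤ a ∧ b ≤ 101) := by
            simpa [List.getD] using hl.2
          have ha : -100 ≤ a := by rcases hbound with h | h; omega; exact h.1
          have hb : b ≤ 101 := by rcases hbound with h | h; omega; exact h.2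
          rw [if_pos hab]
          rw [ih hpre' _ (by rw [List.length_modify, List.length_modify]; exact hj)
            (by rw [List.length_modify, List.length_modify]; exact hd), hD]
          rw [pvGetD_modify _ _ _ _ (by rw [List.length_modify]; exact hj)]
          rw [pvGetD_modify _ _ _ _ hj]
          have hD2 : pvDelta [a, b] j
              = (if (j : Int) = a + 100 then (1:Int) else 0) - (if (j : Int) = b + 100 then (1:Int) else 0) := by
            simp [pvDelta, hab]
          rw [hD2]
          by_cases h1 : (j : Int) = a + 100 <;> by_cases h2 : (j : Int) = b + 100
          · omega
          · rw [if_neg (by omega : ¬ (b + 100).toNat = j), if_pos (by omega : (a + 100).toNat = j),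
              if_pos h1, if_neg h2]
            ring
          · rw [if_pos (by omega : (b + 100).toNat = j), if_neg (by omega : ¬ (a + 100).toNat = j),
              if_neg h1, if_pos h2]
            ring
          · rw [if_neg (by omega : ¬ (b + 100).toNat = j), if_neg (by omega : ¬ (a + 100).toNat = j),
              if_neg h1, if_neg h2]
            ring
        · rw [if_neg hab]
          rw [ih hpre' _ hj hd, hD]
          have : pvDelta [a, b] j = 0 := by simp [pvDelta, hab]
          rw [this]
          ring
      | [], hl => simp at hl
      | [_], hl => simp at hl
      | _ :: _ :: _ :: _, hl => simp at hl

lemma pvSweep (xs : List Int) : ∀ (a0 c0 : Int),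
    (xs.foldl (fun (p : Int × Int) x =>
      (if p.2 + x > 1 then p.1 + 1 else p.1, p.2 + x)) (a0, c0)).1
    = a0 + ((List.range xs.length).countP
        (fun j => decide (c0 + (xs.take (j + 1)).sum > 1)) : Int) := by
  induction xs with
  | nil => intro a0 c0; simp
  | cons x xs ih =>
      intro a0 c0
      simp only [List.foldl_cons, List.length_cons]
      rw [ih]
      rw [List.range_succ_eq_map, List.countP_cons, List.countP_map]
      have hcong : List.countP ((fun j => decide (c0 + ((x :: xs).take (j + 1)).sum > 1)) ∘ Nat.succ) (List.range xs.length)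
          = List.countP (fun j => decide (c0 + x + (xs.take (j + 1)).sum > 1)) (List.range xs.length) := by
        apply List.countP_congr
        intro j hj
        simp only [Function.comp, List.take_succ_cons, List.sum_cons, decide_eq_true_eq]
        constructor <;> intro h <;> linarith
      rw [hcong]
      simp only [List.take_succ_cons, List.take_zero, List.sum_cons, List.sum_nil, add_zero]
      by_cases h : c0 + x > 1 <;> simp only [h, decide_true, decide_false,
        not_false_eq_true, if_pos, if_neg] <;> push_cast <;> ring

lemma pvSum_swap (lines : List (List Int)) (S : List Nat) (g : List Int → Nat → Int) :
    (S.map (fun i => (lines.map (fun l => g l i)).sum)).sum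
      = (lines.map (fun l => (S.map (g l)).sum)).sum := by
  induction lines generalizing S with
  | nil => simp
  | cons l ls ih =>
      simp only [List.map_cons, List.sum_cons]
      rw [← ih]
      rw [← PySem.List.sum_map_add_int]

lemma pvPrefix_delta (l : List Int) (hl : l.length = 2 ∧
    (l.getD 1 0 ≤ l.getD 0 0 ∨ (-100 ≤ l.getD 0 0 ∧ l.getD 1 0 ≤ 101)))
    (j : Nat) :
    ((List.range (j + 1)).map (pvDelta l)).sum = pvInd l j := by
  match l, hl with
  | [a, b], hl =>
    by_cases hab : a < b
    · have hbound : b ≤ a ∨ (-100 ≤ a ∧ b ≤ 101) := by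
        simpa [List.getD] using hl.2
      have ha : -100 ≤ a := by rcases hbound with h | h; omega; exact h.1
      have hb : b ≤ 101 := by rcases hbound with h | h; omega; exact h.2
      have hsplit : ((List.range (j + 1)).map (pvDelta [a, b])).sum
          = ((List.range (j + 1)).map (fun i : Nat => if (i : Int) = a + 100 then (1:Int) else 0)).sum
          + ((List.range (j + 1)).map (fun i : Nat => -(if (i : Int) = b + 100 then (1:Int) else 0))).sum := by
        rw [← PySem.List.sum_map_add_int]
        apply congrArg List.sum
        apply List.map_congr_left
        intro i _
        simp only [pvDelta, if_pos hab]
        ring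
      have hneg : ((List.range (j + 1)).map (fun i : Nat => -(if (i : Int) = b + 100 then (1:Int) else 0))).sum
          = -((List.range (j + 1)).map (fun i : Nat => (if (i : Int) = b + 100 then (1:Int) else 0))).sum := by
        induction (List.range (j + 1)) with
        | nil => simp
        | cons y ys ihy => simp only [List.map_cons, List.sum_cons, ihy]; ring
      rw [hsplit, hneg, pvSum_range_ind, pvSum_range_ind]
      simp only [pvInd]
      have hj1 : ((j + 1 : Nat) : Int) = (j : Int) + 1 := by push_cast; ring
      rw [hj1]
      split_ifs <;> omega
    · have h0 : ∀ i : Nat, pvDelta [a, b] i = 0 := by intro i; simp [pvDelta, hab]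
      have : ((List.range (j + 1)).map (pvDelta [a, b])).sum = 0 := by
        rw [show pvDelta [a, b] = (fun _ : Nat => (0 : Int)) from funext h0]
        simp
      rw [this]
      simp only [pvInd]
      rw [if_neg (by omega)]
  | [], hl => simp at hl
  | [_], hl => simp at hl
  | _ :: _ :: _ :: _, hl => simp at hl

lemma pvSum_take_map_range (f : Nat → Int) (k n : Nat) (hk : k ≤ n) :
    (((List.range n).map f).take k).sum = ((List.range k).map f).sum := by
  rw [← List.map_take, List.take_range, Nat.min_eq_left hk]

-- ===== VERDICT (by name: the statement is the Claim_ definition above) =====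
theorem solution_spec : Claim_equal_solution := by
  intro lines _hdom hpre
  unfold Spec_solution solution solution_alt
  simp only []
  have hA : (lines.foldl (fun c l => match l with | [s, e] => pvAddSeg c s e | _ => c)
      (List.replicate 201 0)) = (List.range 201).map (pvC lines) := by
    apply List.ext_getElem
    · rw [pvFoldA_length]; rw [List.length_replicate, List.length_map, List.length_range]
    · intro j h1 h2
      have hj : j < 201 := by simpa using h2
      rw [← List.getD_eq_getElem _ 0 h1, ← List.getD_eq_getElem _ 0 h2]
      rw [pvFoldA_get lines hpre _ j (by rw [List.length_replicate]; exact hj)]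
      rw [PySem.List.getD_map_range _ _ _ _ hj]
      rw [List.getD_eq_getElem _ _ (by rw [List.length_replicate]; exact hj),
        List.getElem_replicate]
      ring
  have hB : (lines.foldl (fun d l =>
      let s := l.getD 0 0
      let e := l.getD 1 0
      if s < e then ((d.modify (s + 100).toNat (· + 1)).modify (e + 100).toNat (· + (-1))) else d) (List.replicate 202 0)) = (List.range 202).map (pvD lines) := by
    apply List.ext_getElem
    · rw [pvFoldB_length]; rw [List.length_replicate, List.length_map, List.length_range]
    · intro j h1 h2
      have hj : j < 202 := by simpa using h2
      rw [← List.getD_eq_getElem _ 0 h1, ← List.getD_eq_getElem _ 0 h2]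
      rw [pvFoldB_get lines hpre _ j (by rw [List.length_replicate]; exact hj)
        (by rw [List.length_replicate]; norm_num)]
      rw [PySem.List.getD_map_range _ _ _ _ hj]
      rw [List.getD_eq_getElem _ _ (by rw [List.length_replicate]; exact hj),
        List.getElem_replicate]
      ring
  rw [hA, hB]
  have hcount := PySem.List.foldl_count_if (fun i : Int => decide (i > 1))
    ((List.range 201).map (pvC lines)) 0
  simp only [decide_eq_true_eq] at hcount
  rw [hcount, pvSweep]
  rw [List.countP_map]
  simp only [zero_add, List.length_take, List.length_map, List.length_range]
  norm_num
  apply List.countP_congr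
  intro j hj
  have hj201 : j < 201 := List.mem_range.mp hj
  have hpref : ((((List.range 202).map (pvD lines)).take 201).take (j + 1)).sum = pvC lines j := by
    rw [List.take_take, Nat.min_eq_left (by omega)]
    rw [pvSum_take_map_range _ _ _ (by omega)]
    unfold pvD
    rw [pvSum_swap]
    unfold pvC
    congr 1
    apply List.map_congr_left
    intro l hl
    exact pvPrefix_delta l (hpre l hl) j
  simp only [Function.comp, hpref]
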